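-- pv_equiv track=rewrite | github.com/manueldx95/ManuTools | operators/shading_utility.py | calculate_optimal_spacing
-- ===== SOURCE A (Python) =====
-- def get_node_width(node_type):
--     """Restituisce la larghezza approssimativa di un nodo basata sul tipo"""
--     width_map = {
--         "ShaderNodeHueSaturation": 200,
--         "ShaderNodeBrightContrast": 200,
--         "ShaderNodeRGBCurve": 240,
--         "ShaderNodeValToRGB": 240,
--         "ShaderNodeMapRange": 220,
--         "ShaderNodeMath": 160,
--         "ShaderNodeTexImage": 240,
--         # Aggiungi altri tipi se necessario
--     }
--     return width_map.get(node_type, 180)  # Default 180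
--
-- def calculate_optimal_spacing(node_types, base_spacing=50):
--     """Calcola lo spacing ottimale tra i nodi"""
--     spacings = []
--     for i, node_type in enumerate(node_types):
--         if i == 0:
--             spacings.append(0)
--         else:
--             prev_width = get_node_width(node_types[i-1])
--             curr_spacing = prev_width + base_spacing
--             spacings.append(spacings[i-1] + curr_spacing)
--     return spacings
-- ===== SOURCE B (Python) =====
-- def get_node_width(node_type):
--     """Restituisce la larghezza approssimativa di un nodo basata sul tipo"""
--     width_map = {
--         "ShaderNodeHueSaturation": 200,
--         "ShaderNodeBrightContrast": 200,
--         "ShaderNodeRGBCurve": 240,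
--         "ShaderNodeValToRGB": 240,
--         "ShaderNodeMapRange": 220,
--         "ShaderNodeMath": 160,
--         "ShaderNodeTexImage": 240,
--     }
--     return width_map.get(node_type, 180)
--
-- def calculate_optimal_spacing(node_types, base_spacing=50):
--     """Divide and conquer: solve each half independently (each half's spacings
--     start at 0), then shift the right half by the total span of the left half."""
--     def solve(seg):
--         if len(seg) <= 1:
--             return [0] * len(seg)
--         m = len(seg) // 2
--         ls = solve(seg[:m])
--         rs = solve(seg[m:])
--         offset = ls[-1] + (get_node_width(seg[:m][-1]) + base_spacing)
--         return ls + [offset + s for s in rs]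
--     return solve(node_types)
-- ===== Notes on version B (the rewrite author's own statement) =====
-- stated objective: alternative
-- what changed: Replaced A's left-to-right self-referential recurrence spacings[i] = spacings[i-1] + width + base by a divide-and-conquer: each half of the list is solved independently (spacings relative to its own start) and the right half's result is shifted by the left half's total span when merging.
import Mathlib
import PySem

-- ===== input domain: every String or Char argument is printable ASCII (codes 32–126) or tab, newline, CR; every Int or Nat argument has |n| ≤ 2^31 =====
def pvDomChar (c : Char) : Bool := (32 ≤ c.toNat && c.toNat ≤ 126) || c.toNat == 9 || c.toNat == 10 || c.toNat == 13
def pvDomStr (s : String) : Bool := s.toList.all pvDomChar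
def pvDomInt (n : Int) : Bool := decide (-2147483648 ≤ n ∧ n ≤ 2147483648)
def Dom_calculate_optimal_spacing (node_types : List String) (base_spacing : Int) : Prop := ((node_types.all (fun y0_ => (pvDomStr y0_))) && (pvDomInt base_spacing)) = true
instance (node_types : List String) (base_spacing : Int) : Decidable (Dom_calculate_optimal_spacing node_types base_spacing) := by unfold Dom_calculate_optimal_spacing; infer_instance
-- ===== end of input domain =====

-- B replaces A's left-to-right self-referential recurrence by a divide-and-conquer:
-- solve the two halves independently, shift the right half by the left half's span.

-- ===== PORT A =====
def get_node_width (node_type : String) : Int :=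
  PySem.Dict.getD (PySem.Dict.ofList
    [("ShaderNodeHueSaturation", 200),
     ("ShaderNodeBrightContrast", 200),
     ("ShaderNodeRGBCurve", 240),
     ("ShaderNodeValToRGB", 240),
     ("ShaderNodeMapRange", 220),
     ("ShaderNodeMath", 160),
     ("ShaderNodeTexImage", 240)]) node_type 180

def calculate_optimal_spacing (node_types : List String) (base_spacing : Int) : List Int :=
  (PySem.List.enumerate node_types).foldl
    (fun spacings p =>
      if p.1 == 0 then spacings ++ [(0 : Int)]
      else
        let prev_width := get_node_width (PySem.List.pyGetD node_types (p.1 - 1) "")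
        let curr_spacing := prev_width + base_spacing
        spacings ++ [PySem.List.pyGetD spacings (p.1 - 1) 0 + curr_spacing])
    []

-- ===== PORT B =====
-- Python's nested helper 'solve' (captures base_spacing b).
def solveB (b : Int) (seg : List String) : List Int :=
  if seg.length ≤ 1 then List.replicate seg.length 0
  else
    let m := seg.length / 2
    let ls := solveB b (PySem.List.slice seg none (some (m : Int)))
    let rs := solveB b (PySem.List.slice seg (some (m : Int)) none)
    let offset := PySem.List.pyGetD ls (-1) 0
      + (get_node_width (PySem.List.pyGetD (PySem.List.slice seg none (some (m : Int))) (-1) "") + b)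
    ls ++ rs.map (fun s => offset + s)
termination_by seg.length
decreasing_by
  · simp only [PySem.List.slice_to_natCast, List.length_take]; omega
  · simp only [PySem.List.slice_from_natCast, List.length_drop]; omega

def calculate_optimal_spacing_alt (node_types : List String) (base_spacing : Int) : List Int :=
  solveB base_spacing node_types

-- ===== PRECONDITION & SPEC =====
def Spec_calculate_optimal_spacing (node_types : List String) (base_spacing : Int) (out : List Int) : Prop := out = calculate_optimal_spacing_alt node_types base_spacing
instance (node_types : List String) (base_spacing : Int) (out : List Int) : Decidable (Spec_calculate_optimal_spacing node_types base_spacing out) := by unfold Spec_calculate_optimal_spacing; infer_instance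

-- ===== CLAIM (what is proved, stated in full; the proofs are below) =====
def Claim_equal_calculate_optimal_spacing : Prop := ∀ (node_types : List String) (base_spacing : Int), Dom_calculate_optimal_spacing node_types base_spacing → Spec_calculate_optimal_spacing node_types base_spacing (calculate_optimal_spacing node_types base_spacing)

-- ===== LEMMAS AND PROOFS =====

-- Closed form both programs are proved equal to:
-- element k is the sum of the first k steps (step t = width t + b).
def csF (l : List String) (b : Int) : List Int :=
  (List.range l.length).map (fun k => ((l.map (fun t => get_node_width t + b)).take k).sum)

theorem length_csF (l : List String) (b : Int) : (csF l b).length = l.length := by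
  simp [csF]

-- csF's last element plus the last step is the total of all steps.
theorem getLast_csF_add_step (l : List String) (b : Int) (h : l ≠ []) :
    (csF l b).getD (l.length - 1) 0 + (get_node_width (l.getLast h) + b)
      = (l.map (fun t => get_node_width t + b)).sum := by
  have h1 : 1 ≤ l.length := List.length_pos_iff.2 h
  rw [csF, List.getD_eq_getElem _ _ (by simp; omega)]
  simp only [List.getElem_map, List.getElem_range]
  conv_rhs => rw [← List.dropLast_append_getLast (l := l.map (fun t => get_node_width t + b)) (by simpa using h)]
  rw [List.sum_append, List.dropLast_eq_take]
  simp [List.getLast_map]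

-- csF splits at any point m ≤ length: right part is the left total plus csF of the drop.
theorem csF_split (l : List String) (b : Int) (m : Nat) (hm : m ≤ l.length) :
    csF l b = csF (l.take m) b
      ++ (csF (l.drop m) b).map
          (fun s => ((l.take m).map (fun t => get_node_width t + b)).sum + s) := by
  have hlen : l.length = m + (l.length - m) := by omega
  rw [csF, csF, csF, List.length_take, List.length_drop, Nat.min_eq_left hm,
      hlen, List.range_add, List.map_append, List.map_map]
  congr 1
  · apply List.map_congr_left
    intro k hk
    have hk' : k < m := List.mem_range.1 hk
    rw [← List.take_append_drop m l, List.map_append,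
        List.take_append_of_le_length (by simp; omega)]
    simp [List.take_take, Nat.min_eq_left (le_of_lt hk')]
  · rw [List.map_map]
    have hmm : m + (l.length - m) - m = l.length - m := by omega
    rw [hmm]
    apply List.map_congr_left
    intro k hk
    simp only [Function.comp_apply]
    conv_lhs => rw [← List.take_append_drop m l]
    rw [List.map_append]
    have hlm : (List.map (fun t => get_node_width t + b) (l.take m)).length = m := by
      simp [Nat.min_eq_left hm]
    rw [← hlm, List.take_append, List.sum_append, hlm,
        List.take_of_length_le (by rw [hlm]; omega)]
    have h2 : m + k - (List.map (fun t => get_node_width t + b) (l.take m)).length = k := by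
      rw [hlm]; omega
    rw [h2]

-- B's divide and conquer computes the closed form.
theorem solveB_eq_csF (b : Int) (n : Nat) :
    ∀ seg : List String, seg.length ≤ n → solveB b seg = csF seg b := by
  induction n with
  | zero =>
      intro seg hseg
      have : seg = [] := List.eq_nil_of_length_eq_zero (by omega)
      subst this; rw [solveB]; simp [csF]
  | succ n ih =>
      intro seg hseg
      rw [solveB]
      by_cases h1 : seg.length ≤ 1
      · interval_cases h : seg.length
        · simp [List.eq_nil_of_length_eq_zero h, csF]
        · rcases List.length_eq_one_iff.1 h with ⟨t, rfl⟩
          simp [csF]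
      · simp only [if_neg h1]
        have hm1 : 1 ≤ seg.length / 2 := by omega
        have hm2 : seg.length / 2 < seg.length := by omega
        simp only [PySem.List.slice_to_natCast, PySem.List.slice_from_natCast]
        have hlt : (seg.take (seg.length / 2)).length ≤ n := by
          simp only [List.length_take]; omega
        have hrt : (seg.drop (seg.length / 2)).length ≤ n := by
          simp only [List.length_drop]; omega
        rw [ih _ hlt, ih _ hrt]
        have htne : seg.take (seg.length / 2) ≠ [] := by
          apply List.ne_nil_of_length_pos
          rw [List.length_take]; omega
        have hcne : csF (seg.take (seg.length / 2)) b ≠ [] := by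
          apply List.ne_nil_of_length_pos
          rw [length_csF, List.length_take]; omega
        rw [PySem.List.pyGetD_neg_one _ _ hcne, PySem.List.pyGetD_neg_one _ _ htne]
        have hgl : (csF (seg.take (seg.length / 2)) b).getLast hcne
            = (csF (seg.take (seg.length / 2)) b).getD
                ((csF (seg.take (seg.length / 2)) b).length - 1) 0 := by
          rw [List.getLast_eq_getElem, List.getD_eq_getElem _ _ (by
            have := List.length_pos_iff.2 hcne; omega)]
        rw [hgl, length_csF, getLast_csF_add_step _ b htne]
        exact (csF_split seg b (seg.length / 2) (le_of_lt hm2)).symm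

-- ---- A's side ----
-- A's loop body, named for the lemmas below (same term as in the port).
def stepA (node_types : List String) (base_spacing : Int)
    (spacings : List Int) (p : Int × String) : List Int :=
  if p.1 == 0 then spacings ++ [(0 : Int)]
  else
    let prev_width := get_node_width (PySem.List.pyGetD node_types (p.1 - 1) "")
    let curr_spacing := prev_width + base_spacing
    spacings ++ [PySem.List.pyGetD spacings (p.1 - 1) 0 + curr_spacing]

theorem calcA_eq_foldl_stepA (l : List String) (b : Int) :
    calculate_optimal_spacing l b = (PySem.List.enumerate l).foldl (stepA l b) [] := rfl

-- Extending node_types past the enumerated prefix does not change A's loop.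
theorem foldl_stepA_congr (l : List String) (x : String) (b : Int) (init : List Int) :
    (PySem.List.enumerate l).foldl (stepA (l ++ [x]) b) init
      = (PySem.List.enumerate l).foldl (stepA l b) init := by
  apply PySem.List.foldl_congr_mem
  intro acc p hp
  rcases (PySem.List.mem_enumerate_iff _ _ _).1 hp with ⟨k, hk, rfl⟩
  simp only [stepA, zero_add]
  rcases Nat.eq_zero_or_pos k with hk0 | hk0
  · subst hk0; simp
  · have hne : ((k : Int) == 0) = false := by simp; omega
    rw [hne]
    have hcast : (k : Int) - 1 = ((k - 1 : Nat) : Int) := by omega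
    rw [hcast, PySem.List.pyGetD_natCast, PySem.List.pyGetD_natCast,
        List.getD_append _ _ _ _ (by omega)]
    simp

-- csF after appending one element.
theorem csF_snoc (l : List String) (x : String) (b : Int) :
    csF (l ++ [x]) b = csF l b ++ [(l.map (fun t => get_node_width t + b)).sum] := by
  rw [csF, csF, List.length_append, List.length_singleton, List.range_succ, List.map_append]
  congr 1
  · apply List.map_congr_left
    intro k hk
    have hk' : k ≤ l.length := le_of_lt (List.mem_range.1 hk)
    rw [List.map_append, List.take_append_of_le_length (by simpa using hk')]
  · simp

-- A computes the closed form.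
theorem calcA_eq_csF (l : List String) (b : Int) :
    calculate_optimal_spacing l b = csF l b := by
  induction l using List.reverseRecOn with
  | nil => rfl
  | append_singleton l x ih =>
    rw [calcA_eq_foldl_stepA, PySem.List.enumerate_append, List.foldl_append,
        foldl_stepA_congr, ← calcA_eq_foldl_stepA]
    cases l with
    | nil =>
        simp [stepA, calculate_optimal_spacing, PySem.List.enumerate, csF]
    | cons y ys =>
      set l' := y :: ys with hl'
      have hn1 : 1 ≤ l'.length := by simp [hl']
      have hne0 : ((l'.length : Int) == 0) = false := by simp
      simp only [PySem.List.enumerate, List.foldl_cons, List.foldl_nil, stepA, zero_add, hne0,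
        Bool.false_eq_true, if_false]
      have hcast : ((l'.length : Int)) - 1 = (((l'.length - 1 : Nat)) : Int) := by omega
      rw [ih, csF_snoc, hcast, PySem.List.pyGetD_natCast, PySem.List.pyGetD_natCast]
      congr 2
      have hlast : (l' ++ [x]).getD (l'.length - 1) ""
          = l'.getLast (by simp [hl']) := by
        rw [List.getD_append _ _ _ _ (by omega),
            List.getD_eq_getElem _ _ (by omega), List.getLast_eq_getElem]
      rw [hlast]
      exact getLast_csF_add_step l' b (by simp [hl'])

theorem main_eq (l : List String) (b : Int) :
    calculate_optimal_spacing l b = calculate_optimal_spacing_alt l b := by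
  rw [calcA_eq_csF, calculate_optimal_spacing_alt, solveB_eq_csF b l.length l (le_refl _)]

-- ===== VERDICT (by name: the statement is the Claim_ definition above) =====
theorem calculate_optimal_spacing_spec : Claim_equal_calculate_optimal_spacing := by
  intro l b _
  exact main_eq l b
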